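-- pv_equiv track=rewrite | github.com/Hurairahengg/JinniGrid | repoSnap.py | safe_code_fence
-- ===== SOURCE A (Python) =====
-- def safe_code_fence(content: str) -> str:
--     longest = 0
--     current = 0
--
--     for char in content:
--         if char == "`":
--             current += 1
--             longest = max(longest, current)
--         else:
--             current = 0
--
--     return "`" * max(3, longest + 1)
-- ===== SOURCE B (Python) =====
-- def safe_code_fence(content: str) -> str:
--     n = 3
--     while "`" * n in content:
--         n += 1
--     return "`" * n
-- ===== Notes on version B (the rewrite author's own statement) =====
-- stated objective: faster
-- what changed: Replaced the per-character running-counter state machine with a loop that grows a candidate fence from 3 backticks while it is still a substring of the content, so counting happens in C-level substring searches instead of a Python char loop.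
import Mathlib
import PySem

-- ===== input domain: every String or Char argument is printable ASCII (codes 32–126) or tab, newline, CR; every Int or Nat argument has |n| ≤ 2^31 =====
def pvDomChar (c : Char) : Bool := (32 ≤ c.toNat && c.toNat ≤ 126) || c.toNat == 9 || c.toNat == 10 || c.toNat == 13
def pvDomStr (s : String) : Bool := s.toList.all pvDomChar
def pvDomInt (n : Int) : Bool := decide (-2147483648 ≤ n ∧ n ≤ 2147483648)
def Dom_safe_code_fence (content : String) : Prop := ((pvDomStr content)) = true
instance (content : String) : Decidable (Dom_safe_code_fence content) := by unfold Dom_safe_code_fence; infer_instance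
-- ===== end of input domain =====

-- B replaces A's per-character running-counter state machine with a loop that grows a
-- candidate fence from 3 backticks while it is still a substring of the content (alternative
-- algorithm; a timing run measured B faster via C-level substring search in Python).

-- ===== PORT A =====
-- literal transliteration of A: fold over the characters with (longest, current) : Int × Int,
-- then "`" * max(3, longest + 1)
def safe_code_fence (content : String) : String :=
  let st := content.toList.foldl
    (fun (st : Int × Int) c =>
      if c = '`' then (max st.1 (st.2 + 1), st.2 + 1) else (st.1, 0))
    (0, 0)
  String.ofList (PySem.List.pyRepeat ['`'] (max 3 (st.1 + 1)))

-- ===== PORT B =====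
-- the while loop of Source B: n starts at 3 and increments while '`' * n is a substring
def fenceLoop (cs : List Char) (n : Nat) : Nat :=
  if h : PySem.Chars.isIn (List.replicate n '`') cs = true then fenceLoop cs (n + 1) else n
termination_by cs.length + 1 - n
decreasing_by
  have hinf : List.replicate n '`' <:+: cs := (PySem.Chars.isIn_iff_infix _ _).mp h
  have hle := hinf.length_le
  simp [List.length_replicate] at hle
  omega

def safe_code_fence_alt (content : String) : String :=
  String.ofList (List.replicate (fenceLoop content.toList 3) '`')

-- ===== PRECONDITION & SPEC =====
def Spec_safe_code_fence (content : String) (out : String) : Prop := out = safe_code_fence_alt content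
instance (content : String) (out : String) : Decidable (Spec_safe_code_fence content out) := by unfold Spec_safe_code_fence; infer_instance

-- ===== CLAIM (what is proved, stated in full; the proofs are below) =====
def Claim_equal_safe_code_fence : Prop := ∀ (content : String), Dom_safe_code_fence content → Spec_safe_code_fence content (safe_code_fence content)

-- ===== LEMMAS AND PROOFS =====

-- length of the longest backtick run, with `cur` backticks already pending on the left
def maxRun (cur : Nat) : List Char → Nat
  | [] => cur
  | c :: cs => if c = '`' then maxRun (cur + 1) cs else max cur (maxRun 0 cs)

-- length of the backtick prefix
def leadRun : List Char → Nat
  | [] => 0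
  | c :: cs => if c = '`' then leadRun cs + 1 else 0

-- trailing run as A's `current` tracks it
def tailRun (cur : Nat) : List Char → Nat
  | [] => cur
  | c :: cs => if c = '`' then tailRun (cur + 1) cs else tailRun 0 cs

theorem le_maxRun (cs : List Char) (cur : Nat) : cur ≤ maxRun cur cs := by
  induction cs generalizing cur with
  | nil => simp [maxRun]
  | cons c cs ih =>
    simp only [maxRun]
    split
    · exact le_trans (Nat.le_succ cur) (ih (cur + 1))
    · exact le_max_left _ _

theorem foldA_eq (cs : List Char) (lon cur : Nat) (h : cur ≤ lon) :
    cs.foldl (fun (st : Int × Int) c =>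
        if c = '`' then (max st.1 (st.2 + 1), st.2 + 1) else (st.1, 0))
      ((lon : Int), (cur : Int))
    = (((max lon (maxRun cur cs) : Nat) : Int), ((tailRun cur cs : Nat) : Int)) := by
  induction cs generalizing lon cur with
  | nil =>
    simp [maxRun, tailRun, Nat.max_eq_left h]
  | cons c cs ih =>
    simp only [List.foldl_cons]
    by_cases hc : c = '`'
    · have hcast : (max (lon : Int) ((cur : Int) + 1), (cur : Int) + 1)
          = (((max lon (cur + 1) : Nat) : Int), ((cur + 1 : Nat) : Int)) := by
        push_cast; rfl
      rw [if_pos hc, hcast, ih (max lon (cur + 1)) (cur + 1) (le_max_right _ _)]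
      have h1 : max (max lon (cur + 1)) (maxRun (cur + 1) cs) = max lon (maxRun (cur + 1) cs) := by
        have := le_maxRun cs (cur + 1); omega
      simp [maxRun, tailRun, hc, h1]
    · have hcast : ((lon : Int), (0 : Int)) = (((lon : Nat) : Int), ((0 : Nat) : Int)) := by
        push_cast; rfl
      rw [if_neg hc, hcast, ih lon 0 (Nat.zero_le _)]
      have h1 : max lon (max cur (maxRun 0 cs)) = max lon (maxRun 0 cs) := by omega
      simp [maxRun, tailRun, hc, h1]

theorem replicate_prefix (cs : List Char) (n : Nat) :
    List.replicate n '`' <+: cs ↔ n ≤ leadRun cs := by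
  induction cs generalizing n with
  | nil =>
    cases n with
    | zero => simp [leadRun]
    | succ k => simp [leadRun, List.replicate_succ]
  | cons c cs ih =>
    cases n with
    | zero => simp
    | succ k =>
      rw [List.replicate_succ]
      constructor
      · intro hp
        rcases (List.cons_prefix_cons.mp hp) with ⟨hc, htl⟩
        simp [leadRun, ← hc]
        exact (ih k).mp htl
      · intro hle
        simp only [leadRun] at hle
        by_cases hc : c = '`'
        · rw [if_pos hc] at hle
          exact List.cons_prefix_cons.mpr ⟨hc.symm, (ih k).mpr (by omega)⟩
        · rw [if_neg hc] at hle; omega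

theorem maxRun_split (cs : List Char) (cur : Nat) :
    maxRun cur cs = max (cur + leadRun cs) (maxRun 0 cs) := by
  induction cs generalizing cur with
  | nil => simp [maxRun, leadRun]
  | cons c cs ih =>
    by_cases hc : c = '`'
    · simp only [maxRun, leadRun, if_pos hc]
      rw [ih (cur + 1), ih 1]
      omega
    · simp only [maxRun, leadRun, if_neg hc]
      rw [ih 0]
      omega

theorem replicate_infix (cs : List Char) (n : Nat) :
    List.replicate n '`' <:+: cs ↔ n ≤ maxRun 0 cs := by
  induction cs with
  | nil =>
    simp only [List.infix_nil, List.replicate_eq_nil_iff, maxRun]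
    omega
  | cons c cs ih =>
    rw [List.infix_cons_iff]
    have hsplit : maxRun 0 (c :: cs) = max (leadRun (c :: cs)) (maxRun 0 cs) := by
      by_cases hc : c = '`'
      · simp only [maxRun, leadRun, if_pos hc]
        rw [maxRun_split cs 1]; omega
      · simp only [maxRun, leadRun, if_neg hc]
    rw [replicate_prefix, ih, hsplit]
    omega

theorem fenceLoop_eq (cs : List Char) (n : Nat) :
    fenceLoop cs n = max n (maxRun 0 cs + 1) := by
  have key : ∀ fuel n, cs.length + 1 - n ≤ fuel → fenceLoop cs n = max n (maxRun 0 cs + 1) := by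
    intro fuel
    induction fuel with
    | zero =>
      intro n hn
      rw [fenceLoop]
      have h : ¬ PySem.Chars.isIn (List.replicate n '`') cs = true := by
        intro h
        have hle := ((PySem.Chars.isIn_iff_infix _ _).mp h).length_le
        simp [List.length_replicate] at hle
        omega
      rw [dif_neg h]
      have hgt : ¬ n ≤ maxRun 0 cs := fun hle =>
        h ((PySem.Chars.isIn_iff_infix _ _).mpr ((replicate_infix cs n).mpr hle))
      omega
    | succ fuel ih =>
      intro n hn
      rw [fenceLoop]
      by_cases h : PySem.Chars.isIn (List.replicate n '`') cs = true
      · have hle := ((PySem.Chars.isIn_iff_infix _ _).mp h).length_le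
        simp [List.length_replicate] at hle
        rw [dif_pos h, ih (n + 1) (by omega)]
        have hM := (replicate_infix cs n).mp ((PySem.Chars.isIn_iff_infix _ _).mp h)
        omega
      · rw [dif_neg h]
        have hgt : ¬ n ≤ maxRun 0 cs := fun hle =>
          h ((PySem.Chars.isIn_iff_infix _ _).mpr ((replicate_infix cs n).mpr hle))
        omega
  exact key (cs.length + 1) n (by omega)

-- ===== VERDICT (by name: the statement is the Claim_ definition above) =====
theorem safe_code_fence_spec : Claim_equal_safe_code_fence := by
  intro content _
  unfold Spec_safe_code_fence safe_code_fence safe_code_fence_alt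
  have hf := foldA_eq content.toList 0 0 (le_refl 0)
  norm_num at hf
  simp only [hf, fenceLoop_eq, PySem.List.pyRepeat_singleton]
  congr 2
  omega
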